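-- pv_equiv track=rewrite | github.com/felix-wolf/MatchFinder | matchFinder/helper.py | create_txt
-- ===== SOURCE A (Python) =====
-- def create_txt(data):
--     """
--     creates a WikiDocs output from some verteilungs result
--
--     Parameter
--     ----------
--     data : array
--         the result of a verteilungsauswertung as an array
--
--     Returns
--     ----------
--     string
--         WikiDocs data
--     """
--
--     rtn = "ALS TABELLE:\n\n"
--     rtn += "===== Auswertung der Verteilung =====\n"
--     rtn += "| Name | Thema | Wahl |"
--     for studi in data:
--         rtn += "\n|" + studi[0] + "|" + studi[1] + "|" + str(studi[2]) + "|"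
--     rtn += "\n\n\n\nALS LISTE:\n\n"
--     rtn += "===== Auswertung der Verteilung =====\n"
--     themen = sorted(list(set(map(lambda x: x[1], data))))
--     for thema in themen:
--         rtn += "- " + thema + " -- "
--         rtn += "".join(map(str, map(lambda x: x + ", ", sorted(list(
--                     map(lambda c: c[0], filter(lambda x: x[1] == thema, data)))))))
--         rtn = rtn[:-2] + "\n"
--     return rtn
-- ===== SOURCE B (Python) =====
-- def create_txt(data):
--     parts = ["ALS TABELLE:\n\n===== Auswertung der Verteilung =====\n| Name | Thema | Wahl |"]
--     groups = {}
--     for studi in data: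
--         parts.append("\n|" + studi[0] + "|" + studi[1] + "|" + str(studi[2]) + "|")
--         groups.setdefault(studi[1], []).append(studi[0])
--     parts.append("\n\n\n\nALS LISTE:\n\n===== Auswertung der Verteilung =====\n")
--     for thema in sorted(groups):
--         parts.append("- " + thema + " -- " + ", ".join(sorted(groups[thema])) + "\n")
--     return "".join(parts)
-- ===== Notes on version B (the rewrite author's own statement) =====
-- stated objective: faster
-- what changed: B makes one pass over the data that simultaneously emits the table rows and groups names by thema in a dict, then sorts each group once, instead of A's re-scan of the whole data list (filter + sort) for every distinct thema; output pieces are collected in a list and joined once instead of repeated string concatenation.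
import Mathlib
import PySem

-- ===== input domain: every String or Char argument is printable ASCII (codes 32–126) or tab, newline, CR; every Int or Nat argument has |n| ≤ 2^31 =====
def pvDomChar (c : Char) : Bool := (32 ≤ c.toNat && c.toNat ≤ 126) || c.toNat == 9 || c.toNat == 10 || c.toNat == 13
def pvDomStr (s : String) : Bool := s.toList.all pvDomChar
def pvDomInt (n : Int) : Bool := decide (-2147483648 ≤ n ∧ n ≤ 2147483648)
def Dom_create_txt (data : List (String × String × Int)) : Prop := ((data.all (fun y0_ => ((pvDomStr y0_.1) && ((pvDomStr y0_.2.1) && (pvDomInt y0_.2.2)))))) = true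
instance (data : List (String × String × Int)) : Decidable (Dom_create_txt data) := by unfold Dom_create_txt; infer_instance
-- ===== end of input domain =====

-- B builds the table rows and the per-thema name groups in ONE pass (dict of lists), then sorts each
-- group once, instead of A's filter+sort re-scan of the whole data list per distinct thema.
-- Strings are ported on the List Char side (PySem.Chars) and wrapped with String.ofList at the end.

-- ===== PORT A =====
def create_txt (data : List (String × String × Int)) : String :=
  -- rtn = "ALS TABELLE:\n\n"; rtn += …; rtn += "| Name | Thema | Wahl |"
  let rtn : List Char :=
    "ALS TABELLE:\n\n".toList ++ "===== Auswertung der Verteilung =====\n".toList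
      ++ "| Name | Thema | Wahl |".toList
  -- for studi in data: rtn += "\n|" + studi[0] + "|" + studi[1] + "|" + str(studi[2]) + "|"
  let rtn := data.foldl (fun rtn studi =>
    rtn ++ "\n|".toList ++ studi.1.toList ++ "|".toList ++ studi.2.1.toList ++ "|".toList
      ++ PySem.Int.toChars studi.2.2 ++ "|".toList) rtn
  let rtn := rtn ++ "\n\n\n\nALS LISTE:\n\n".toList
      ++ "===== Auswertung der Verteilung =====\n".toList
  -- themen = sorted(list(set(map(lambda x: x[1], data))))
  let themen := PySem.List.sorted (PySem.Set.ofList (data.map (fun x => x.2.1))) (fun x => x) false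
  let rtn := themen.foldl (fun rtn thema =>
    -- rtn += "- " + thema + " -- "
    let rtn := rtn ++ "- ".toList ++ thema.toList ++ " -- ".toList
    -- rtn += "".join(map(str, map(lambda x: x + ", ", sorted(list(map(lambda c: c[0], filter(lambda x: x[1] == thema, data)))))))
    -- (str(x) on a str is the identity)
    let rtn := rtn ++ PySem.Chars.join []
      ((PySem.List.sorted ((data.filter (fun x => x.2.1 == thema)).map (fun c => c.1))
          (fun x => x) false).map (fun x => x.toList ++ ", ".toList))
    -- rtn = rtn[:-2] + "\n"
    PySem.List.slice rtn none (some (-2)) ++ "\n".toList) rtn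
  String.ofList rtn

-- ===== PORT B =====
def create_txt_alt (data : List (String × String × Int)) : String :=
  let parts : List (List Char) :=
    ["ALS TABELLE:\n\n===== Auswertung der Verteilung =====\n| Name | Thema | Wahl |".toList]
  -- one pass: append the table row AND group the name under its thema
  let pg := data.foldl
    (fun (s : List (List Char) × PySem.Dict String (List String)) studi =>
      (s.1 ++ ["\n|".toList ++ studi.1.toList ++ "|".toList ++ studi.2.1.toList ++ "|".toList
                ++ PySem.Int.toChars studi.2.2 ++ "|".toList],   -- parts.append(…)
       s.2.modify studi.2.1 [] (fun v => v ++ [studi.1])))       -- groups.setdefault(studi[1], []).append(studi[0])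
    (parts, PySem.Dict.empty)
  let parts := pg.1 ++ ["\n\n\n\nALS LISTE:\n\n===== Auswertung der Verteilung =====\n".toList]
  let parts := (PySem.List.sorted pg.2.keys (fun x => x) false).foldl (fun parts thema =>
    parts ++ ["- ".toList ++ thema.toList ++ " -- ".toList
      ++ PySem.Chars.join ", ".toList
           ((PySem.List.sorted (pg.2.getD thema []) (fun x => x) false).map String.toList)
      ++ "\n".toList]) parts
  String.ofList (PySem.Chars.join [] parts)

-- ===== PRECONDITION & SPEC =====
def Spec_create_txt (data : List (String × String × Int)) (out : String) : Prop := out = create_txt_alt data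
instance (data : List (String × String × Int)) (out : String) : Decidable (Spec_create_txt data out) := by unfold Spec_create_txt; infer_instance

-- ===== CLAIM (what is proved, stated in full; the proofs are below) =====
def Claim_equal_create_txt : Prop := ∀ (data : List (String × String × Int)), Dom_create_txt data → Spec_create_txt data (create_txt data)

-- ===== LEMMAS AND PROOFS =====

-- joining with an empty separator is flattening
lemma join_nil_eq_flatten (ls : List (List Char)) : PySem.Chars.join [] ls = ls.flatten := by
  induction ls with
  | nil => simp [PySem.Chars.join_nil]
  | cons a t ih => cases t with
    | nil => simp [PySem.Chars.join_singleton]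
    | cons b r => rw [PySem.Chars.join_cons_cons]; simp_all

-- appending ", " to every piece and flattening = ", "-join plus one trailing ", " (nonempty list)
lemma flatten_comma (ls : List (List Char)) (h : ls ≠ []) :
    (ls.map (fun x => x ++ ", ".toList)).flatten = PySem.Chars.join ", ".toList ls ++ ", ".toList := by
  induction ls with
  | nil => simp at h
  | cons a t ih => cases t with
    | nil => simp [PySem.Chars.join_singleton]
    | cons b r =>
        rw [PySem.Chars.join_cons_cons]
        simp only [List.map_cons, List.flatten_cons] at ih ⊢
        rw [ih (by simp)]
        simp

-- A's per-thema step "append all 'name, ' pieces then strip the last 2 chars" equals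
-- B's "append the ', '-join" (nonempty group)
lemma strip_two (pre : List Char) (ls : List (List Char)) (h : ls ≠ []) :
    PySem.List.slice (pre ++ PySem.Chars.join [] (ls.map (fun x => x ++ ", ".toList))) none (some (-2))
      = pre ++ PySem.Chars.join ", ".toList ls := by
  rw [join_nil_eq_flatten, flatten_comma ls h,
      PySem.List.slice_to_neg_ofNat _ 2 (by omega)]
  have : pre ++ (PySem.Chars.join ", ".toList ls ++ ", ".toList)
      = (pre ++ PySem.Chars.join ", ".toList ls) ++ ", ".toList := by simp
  rw [this]
  have hlen : ((pre ++ PySem.Chars.join ", ".toList ls) ++ ", ".toList).length - 2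
      = (pre ++ PySem.Chars.join ", ".toList ls).length := by simp; omega
  rw [hlen, List.take_left]

-- ===== VERDICT (by name: the statement is the Claim_ definition above) =====
theorem create_txt_spec : Claim_equal_create_txt := by
  intro data _
  unfold Spec_create_txt create_txt create_txt_alt
  dsimp only
  -- split B's one-pass fold into its two accumulators
  rw [PySem.List.foldl_prod_mk
        (f := fun parts (studi : String × String × Int) =>
          parts ++ ["\n|".toList ++ studi.1.toList ++ "|".toList ++ studi.2.1.toList ++ "|".toList
                ++ PySem.Int.toChars studi.2.2 ++ "|".toList])
        (g := fun (d : PySem.Dict String (List String)) studi =>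
          d.modify studi.2.1 [] (fun v => v ++ [studi.1]))]
  simp only
  -- B's dict: its keys are exactly A's set of themen
  have hkeys : (data.foldl (fun (d : PySem.Dict String (List String)) studi =>
          d.modify studi.2.1 [] (fun v => v ++ [studi.1])) PySem.Dict.empty).keys
      = PySem.Set.ofList (data.map (fun x => x.2.1)) := by
    rw [PySem.Dict.keys_foldl_modify_key data (fun x => x.2.1) []
          (fun _ studi => (fun v => v ++ [studi.1])) PySem.Dict.empty,
        PySem.Dict.keys_empty, PySem.Set.update_nil_left]
  -- B's dict: each group is A's filtered name list, in data order
  have hgetD : ∀ t, (data.foldl (fun (d : PySem.Dict String (List String)) studi =>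
          d.modify studi.2.1 [] (fun v => v ++ [studi.1])) PySem.Dict.empty).getD t []
      = (data.filter (fun x => x.2.1 == t)).map (fun c => c.1) := by
    intro t
    have := PySem.Dict.getD_foldl_modify_append
        (data.map (fun s : String × String × Int => (s.2.1, s.1))) PySem.Dict.empty t
    rw [List.foldl_map] at this
    simp only [this, PySem.Dict.getD_empty, List.nil_append, List.filter_map, List.map_map]
    congr 1
  rw [hkeys]
  -- rewrite A's per-thema step into a plain append, for themen members (nonempty groups)
  rw [PySem.List.foldl_congr_mem _ _
        (fun rtn thema => rtn ++ ("- ".toList ++ thema.toList ++ " -- ".toList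
          ++ PySem.Chars.join ", ".toList
              ((PySem.List.sorted ((data.filter (fun x => x.2.1 == thema)).map (fun c => c.1))
                  (fun x => x) false).map String.toList)
          ++ "\n".toList)) _
        (by
          intro acc t ht
          have hmem : t ∈ data.map (fun x => x.2.1) := by
            have := (PySem.List.sorted_perm
                (PySem.Set.ofList (data.map (fun x => x.2.1))) (fun x => x) false).mem_iff.mp ht
            exact (PySem.Set.mem_ofList _ _).mp this
          have hne : (data.filter (fun x => x.2.1 == t)).map (fun c => c.1) ≠ [] := by
            simp only [ne_eq, List.map_eq_nil_iff, List.filter_eq_nil_iff, not_forall]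
            obtain ⟨x, hx, hxt⟩ := List.mem_map.mp hmem
            exact ⟨x, hx, by simp [hxt]⟩
          have hne' : (PySem.List.sorted ((data.filter (fun x => x.2.1 == t)).map (fun c => c.1))
              (fun x => x) false) ≠ [] := by
            intro hc
            exact hne ((PySem.List.sorted_eq_nil_iff _ _ _).mp hc)
          have := strip_two (acc ++ "- ".toList ++ t.toList ++ " -- ".toList)
              ((PySem.List.sorted ((data.filter (fun x => x.2.1 == t)).map (fun c => c.1))
                  (fun x => x) false).map String.toList) (by simpa using hne')
          simp only [List.map_map, Function.comp_def] at this
          rw [this]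
          dsimp only
          simp only [List.append_assoc])]
  -- now both sides are header ++ rows ++ mid ++ thema-fragments
  rw [PySem.List.foldl_append_eq_flatMap,
      PySem.List.foldl_append_singleton_eq_map, PySem.List.foldl_append_singleton_eq_map]
  simp only [List.append_assoc]
  rw [PySem.List.foldl_append_eq_flatMap
        (g := fun studi : String × String × Int => "\n|".toList ++ (studi.1.toList ++ ("|".toList
          ++ (studi.2.1.toList ++ ("|".toList ++ (PySem.Int.toChars studi.2.2 ++ "|".toList))))))]
  simp only [join_nil_eq_flatten, List.flatten_append, List.flatten_cons, List.flatten_nil,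
    hgetD, List.flatMap_def, List.append_assoc, List.append_nil]
  congr 1
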